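-- pv_equiv track=rewrite | github.com/raztor/Python-Tel101 | Ejercicios/C-4/Practico-8-(2021)/P8(2021).py | tipos
-- ===== SOURCE A (Python) =====
-- def pedidos(lista):
--     dicc = {}
--     for linea in lista:
--         tipo, nombre, total = linea
--         if tipo in dicc:
--             dicc[tipo] += total
--         else:
--             dicc[tipo] = total
--     return dicc
--
-- def tipos(lista):
--     llarga = []
--     lfinal = []
--     dicc = pedidos(lista)
--     for nombre in dicc:
--         llarga.append((dicc[nombre], nombre))
--     llarga.sort(reverse=True)
--     for item in llarga[:3]:
--         cant, nombre = item
--         lfinal.append(nombre)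
--     return lfinal
-- ===== SOURCE B (Python) =====
-- def tipos(lista):
--     # one aggregation pass; then select the top 3 (total, name) pairs by
--     # repeated maximum extraction instead of fully sorting the pair list
--     totales = {}
--     for tipo, _nombre, total in lista:
--         totales[tipo] = totales.get(tipo, 0) + total
--     pares = [(total, tipo) for tipo, total in totales.items()]
--     lfinal = []
--     while pares and len(lfinal) < 3:
--         mejor = max(pares)
--         pares.remove(mejor)
--         lfinal.append(mejor[1])
--     return lfinal
-- ===== Notes on version B (the rewrite author's own statement) =====
-- stated objective: alternative
-- what changed: B keeps the single aggregation pass over a dict but replaces A's build-tuple-list + full sort(reverse=True) + slice[:3] with bounded selection: it repeatedly extracts the maximum (total, name) pair (full-tuple comparison, so ties break exactly as A's sort) at most three times.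
import Mathlib
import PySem

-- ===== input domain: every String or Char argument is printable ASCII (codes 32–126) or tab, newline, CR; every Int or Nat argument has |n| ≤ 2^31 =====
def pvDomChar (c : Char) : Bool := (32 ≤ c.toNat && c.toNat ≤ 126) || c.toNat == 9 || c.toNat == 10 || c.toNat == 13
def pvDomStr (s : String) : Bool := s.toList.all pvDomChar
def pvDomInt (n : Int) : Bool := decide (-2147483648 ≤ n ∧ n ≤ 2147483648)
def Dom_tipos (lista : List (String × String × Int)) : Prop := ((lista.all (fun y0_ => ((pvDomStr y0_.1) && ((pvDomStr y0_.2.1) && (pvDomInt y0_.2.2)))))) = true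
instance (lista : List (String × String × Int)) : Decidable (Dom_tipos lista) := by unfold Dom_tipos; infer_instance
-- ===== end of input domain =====

-- B replaces A's full descending sort of the (total, name) pairs by at most three
-- maximum-extraction passes (same tuple comparison, hence the same tie-breaking).

-- ===== PORT A =====
-- for …: if tipo in dicc: dicc[tipo] += total else: dicc[tipo] = total
-- (dicc[tipo] is read only under the 'tipo in dicc' guard, so getD is exact here)
def pedidos (lista : List (String × String × Int)) : PySem.Dict String Int :=
  lista.foldl (fun dicc linea =>
    if dicc.contains linea.1 then dicc.insert linea.1 (dicc.getD linea.1 0 + linea.2.2)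
    else dicc.insert linea.1 linea.2.2) PySem.Dict.empty

def tipos (lista : List (String × String × Int)) : List String :=
  let dicc := pedidos lista
  -- for nombre in dicc: llarga.append((dicc[nombre], nombre))
  let llarga := dicc.keys.foldl (fun llarga nombre => llarga ++ [(dicc.getD nombre 0, nombre)]) []
  -- llarga.sort(reverse=True): Python tuple comparison = lexicographic on (total, name)
  let llarga := PySem.List.sorted2 llarga Prod.fst Prod.snd true
  -- for item in llarga[:3]: lfinal.append(item[1])
  (PySem.List.slice llarga none (some 3)).foldl (fun lfinal item => lfinal ++ [item.2]) []

-- ===== PORT B =====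
-- while pares and len(lfinal) < 3: mejor = max(pares); pares.remove(mejor); lfinal.append(mejor[1])
-- fuel = 3 - len(lfinal); 'while pares' (and max() on the nonempty list) is the max2? = none test;
-- pares.remove(mejor) never raises since mejor ∈ pares, so .getD pares is exact
def tiposAltPick : Nat → List (Int × String) → List String
  | 0, _ => []
  | Nat.succ k, pares =>
    match PySem.List.max2? pares Prod.fst Prod.snd with
    | none => []
    | some mejor => mejor.2 :: tiposAltPick k ((PySem.List.remove? pares mejor).getD pares)

def tipos_alt (lista : List (String × String × Int)) : List String :=
  let totales := lista.foldl (fun d x => d.modify x.1 0 (· + x.2.2)) PySem.Dict.empty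
  let pares := totales.items.map (fun p => (p.2, p.1))
  tiposAltPick 3 pares

-- ===== PRECONDITION & SPEC =====
def Spec_tipos (lista : List (String × String × Int)) (out : List String) : Prop := out = tipos_alt lista
instance (lista : List (String × String × Int)) (out : List String) : Decidable (Spec_tipos lista out) := by unfold Spec_tipos; infer_instance

-- ===== CLAIM (what is proved, stated in full; the proofs are below) =====
def Claim_equal_tipos : Prop := ∀ (lista : List (String × String × Int)), Dom_tipos lista → Spec_tipos lista (tipos lista)

-- ===== LEMMAS AND PROOFS =====

-- Python's tuple order on (Int, String) pairs, named through Mathlib's lexicographic order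
def keyL (p : Int × String) : Lex (Int × String) := toLex p

-- the two aggregation folds build the same dict (A's guarded insert is exactly dict-modify)
theorem pedidos_eq_modify (lista : List (String × String × Int)) :
    pedidos lista = lista.foldl (fun d x => d.modify x.1 0 (· + x.2.2)) PySem.Dict.empty := by
  unfold pedidos
  refine List.foldl_ext _ _ _ (fun d x _ => ?_)
  simp only [PySem.Dict.modify]
  by_cases h : d.contains x.1
  · simp [h]
  · rw [if_neg h, PySem.Dict.getD_of_not_contains d 0 (by simpa using h), zero_add]

-- Python's boolean tuple-comparison test is the lexicographic-order test
theorem ltb_eq (a b : Int × String) :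
    (decide (a.1 < b.1) || (!decide (b.1 < a.1) && decide (a.2 < b.2))) = decide (keyL a < keyL b) := by
  have hlt : keyL a < keyL b ↔ a.1 < b.1 ∨ (a.1 = b.1 ∧ a.2 < b.2) := Prod.Lex.lt_iff
  rcases lt_trichotomy a.1 b.1 with h | h | h
  · simp [h, hlt]
  · have h1 : ¬ a.1 < b.1 := by omega
    have h2 : ¬ b.1 < a.1 := by omega
    simp [hlt, h]
  · have h1 : ¬ a.1 < b.1 := by omega
    have hne : ¬ a.1 = b.1 := by omega
    simp [h1, h, hne, hlt]

-- sorted2 with fst/snd keys is sorting by the lexicographic key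
theorem sorted2_eq_sorted_keyL (xs : List (Int × String)) :
    PySem.List.sorted2 xs Prod.fst Prod.snd true = PySem.List.sorted xs keyL true := by
  rw [PySem.List.sorted_rev_eq_foldl_insertBy]
  unfold PySem.List.sorted2
  refine List.foldl_ext _ _ _ (fun acc x _ => ?_)
  congr 1
  funext a b
  rw [if_pos rfl]
  exact ltb_eq b a

-- max2? with fst/snd keys is max? by the lexicographic key
theorem max2_eq_max_keyL (xs : List (Int × String)) :
    PySem.List.max2? xs Prod.fst Prod.snd = PySem.List.max? xs keyL := by
  unfold PySem.List.max2? PySem.List.max?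
  refine List.foldl_ext _ _ _ (fun acc x _ => ?_)
  cases acc with
  | none => rfl
  | some m =>
    show (if (decide (m.1 < x.1) || (!decide (x.1 < m.1) && decide (m.2 < x.2))) = true then some x else some m)
        = (if keyL m < keyL x then some x else some m)
    rw [show ((decide (m.1 < x.1) || (!decide (x.1 < m.1) && decide (m.2 < x.2)))) = decide (keyL m < keyL x) from ltb_eq m x]
    by_cases h : keyL m < keyL x <;> simp [h]

-- with pairwise-distinct keys, taking k of the descending sort is k-fold max extraction
theorem take_sorted_eq_pick (k : Nat) (l : List (Int × String))
    (hl : l.Pairwise fun a b => keyL a ≠ keyL b) :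
    ((PySem.List.sorted l keyL true).take k).map Prod.snd = tiposAltPick k l := by
  induction k generalizing l with
  | zero => simp [tiposAltPick]
  | succ k ih =>
    cases hs : PySem.List.sorted l keyL true with
    | nil =>
      have hl0 : l = [] := (PySem.List.sorted_eq_nil_iff l keyL true).mp hs
      subst hl0
      simp [tiposAltPick, max2_eq_max_keyL, PySem.List.max?]
    | cons m t =>
      have hperm : (m :: t).Perm l := by rw [← hs]; exact PySem.List.sorted_perm l keyL true
      have hml : m ∈ l := hperm.mem_iff.mp (List.mem_cons_self ..)
      have hmax : ∀ y ∈ l, keyL y ≤ keyL m := PySem.List.key_head_sorted_rev_ge l keyL hs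
      have hinj : ∀ a ∈ l, ∀ b ∈ l, keyL a = keyL b → a = b := by
        intro a ha b hb hk
        by_contra hne
        exact (List.Pairwise.forall (fun _ _ h h' => h h'.symm) hl) ha hb hne hk
      have hmaxeq : PySem.List.max? l keyL = some m := by
        cases hm : PySem.List.max? l keyL with
        | none =>
          have := (PySem.List.max?_eq_none_iff l keyL).mp hm
          subst this; simp at hml
        | some m' =>
          have hm'l : m' ∈ l := PySem.List.max?_mem hm
          have h1 : keyL m' ≤ keyL m := hmax m' hm'l
          have h2 : keyL m ≤ keyL m' := PySem.List.max?_isMax hm m hml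
          rw [hinj m' hm'l m hml (le_antisymm h1 h2)]
      have hterase : t.Perm (l.erase m) :=
        ((List.perm_cons_erase hml).symm.trans hperm.symm).symm.cons_inv
      have hpne : (m :: t).Pairwise fun a b => keyL a ≠ keyL b :=
        ((hperm.pairwise_iff (fun h h' => (h h'.symm))).mpr hl)
      have hpt : t.Pairwise fun a b => keyL a ≠ keyL b := hpne.of_cons
      have hple : (m :: t).Pairwise fun a b => keyL b ≤ keyL a := by
        rw [← hs]; exact PySem.List.sorted_pairwise_rev l keyL
      have hsorted_t : PySem.List.sorted (l.erase m) keyL true = t := by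
        refine PySem.List.sorted_rev_eq_of_perm_of_pairwise_gt _ _ _ hterase ?_
        have := hple.of_cons.and hpt
        exact this.imp (fun h => lt_of_le_of_ne h.1 (fun he => h.2 he.symm))
      have hperase : (l.erase m).Pairwise fun a b => keyL a ≠ keyL b :=
        hl.sublist (List.erase_sublist ..)
      have hrm : (PySem.List.remove? l m).getD l = l.erase m := by
        rw [PySem.List.remove?_eq_some_erase l m hml]; rfl
      rw [List.take_succ_cons]
      rw [List.map_cons]
      rw [← hsorted_t]
      rw [ih (l.erase m) hperase]
      simp only [tiposAltPick, max2_eq_max_keyL, hmaxeq, hrm]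

theorem tipos_eq (lista : List (String × String × Int)) : tipos lista = tipos_alt lista := by
  have hnodup : (pedidos lista).keys.Nodup := by
    rw [pedidos_eq_modify]
    exact PySem.Dict.nodup_keys_foldl_modify_key _ _ _ _ _ PySem.Dict.nodup_keys_empty
  simp only [tipos, tipos_alt, ← pedidos_eq_modify lista]
  rw [PySem.List.foldl_append_singleton_eq_map (fun nombre => ((pedidos lista).getD nombre 0, nombre)),
      PySem.Dict.items_eq_map_keys _ hnodup 0, List.map_map]
  rw [PySem.List.slice_to _ (by norm_num), sorted2_eq_sorted_keyL,
      PySem.List.foldl_append_singleton_eq_map Prod.snd]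
  simp only [List.nil_append]
  refine take_sorted_eq_pick 3 _ ?_
  rw [List.pairwise_map]
  refine List.Pairwise.imp ?_ hnodup
  intro a b hab hk
  exact hab (congrArg (fun q => (ofLex q).2) hk)

-- ===== VERDICT (by name: the statement is the Claim_ definition above) =====
theorem tipos_spec : Claim_equal_tipos := by
  intro lista _
  unfold Spec_tipos
  exact tipos_eq lista
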